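-- pv_equiv track=rewrite | github.com/KisloTAooAnkit/Python-Programs | DP2/Minimum Removals from array to make maxmink.py | helper
-- ===== SOURCE A (Python) =====
-- def helper(arr,start,end,k):
--     if start >= end:
--         return 0
--     if arr[end] - arr[start] <=k:
--         return 0
--
--     ans1 = 1 + helper(arr,start,end-1,k)
--     ans2 = 1 + helper(arr,start+1,end,k)
--
--     return min(ans1,ans2)
-- ===== SOURCE B (Python) =====
-- def helper(arr, start, end, k):
--     # Iterative scan over all (i, j) keep-windows instead of A's branching recursion:
--     # the answer is the cheapest pair start<=i<j<=end with arr[j]-arr[i]<=k (cost = removals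
--     # (i-start)+(end-j)), or end-start when no such pair exists.
--     if start >= end:
--         return 0
--     best = end - start
--     for i in range(start, end + 1):
--         for j in range(i + 1, end + 1):
--             if arr[j] - arr[i] <= k:
--                 best = min(best, (i - start) + (end - j))
--     return best
-- ===== Notes on version B (the rewrite author's own statement) =====
-- stated objective: alternative
-- what changed: Replaces the exponential two-branch recursion (remove from left or right at each step) with an iterative double loop that directly minimizes (i-start)+(end-j) over all index pairs i<j whose values differ by at most k.
import Mathlib
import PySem

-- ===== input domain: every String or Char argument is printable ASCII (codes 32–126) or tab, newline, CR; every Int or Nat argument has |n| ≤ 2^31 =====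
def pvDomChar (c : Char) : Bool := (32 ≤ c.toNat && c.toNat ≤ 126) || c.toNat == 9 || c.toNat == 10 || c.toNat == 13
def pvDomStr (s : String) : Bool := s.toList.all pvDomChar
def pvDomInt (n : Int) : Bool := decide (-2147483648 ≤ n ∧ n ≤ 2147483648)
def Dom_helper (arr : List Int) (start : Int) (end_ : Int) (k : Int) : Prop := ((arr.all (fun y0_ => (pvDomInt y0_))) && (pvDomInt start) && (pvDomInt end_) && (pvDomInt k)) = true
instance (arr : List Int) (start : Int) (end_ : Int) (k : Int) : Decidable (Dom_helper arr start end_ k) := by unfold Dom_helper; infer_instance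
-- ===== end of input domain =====

-- B replaces A's two-branch recursion by an iterative double loop minimizing the
-- removal count over all kept index pairs (objective: alternative).

-- ===== PORT A =====
-- literal port of A; where Python indexing would raise IndexError, pyGet? = none and
-- .getD 0 is a harmless total default (those inputs are excluded by Pre_helper)
def helper (arr : List Int) (start : Int) (end_ : Int) (k : Int) : Int :=
  if start ≥ end_ then 0
  else if (PySem.List.pyGet? arr end_).getD 0 - (PySem.List.pyGet? arr start).getD 0 ≤ k then 0
  else min (1 + helper arr start (end_ - 1) k) (1 + helper arr (start + 1) end_ k)
termination_by (end_ - start).toNat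
decreasing_by all_goals omega

-- ===== PORT B =====
def helper_alt (arr : List Int) (start : Int) (end_ : Int) (k : Int) : Int :=
  if start ≥ end_ then 0
  else
    (PySem.List.pyRange start (end_ + 1) 1).foldl (fun best i =>
      (PySem.List.pyRange (i + 1) (end_ + 1) 1).foldl (fun best j =>
        if (PySem.List.pyGet? arr j).getD 0 - (PySem.List.pyGet? arr i).getD 0 ≤ k then
          min best ((i - start) + (end_ - j))
        else best) best) (end_ - start)

-- ===== PRECONDITION & SPEC =====
-- Pre_ excludes exactly the inputs where Python A raises IndexError: start < end with
-- start below -len(arr) or end beyond the last index (the very first accesses arr[end], arr[start]).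
def Pre_helper (arr : List Int) (start : Int) (end_ : Int) (k : Int) : Prop :=
  start < end_ → (-(arr.length : Int) ≤ start ∧ end_ < (arr.length : Int))
instance (arr : List Int) (start : Int) (end_ : Int) (k : Int) : Decidable (Pre_helper arr start end_ k) := by unfold Pre_helper; infer_instance

def pvWitness_helper : List Int × Int × Int × Int := ([1, 3, 7, 10], 0, 3, 4)

def Spec_helper (arr : List Int) (start : Int) (end_ : Int) (k : Int) (out : Int) : Prop := out = helper_alt arr start end_ k
instance (arr : List Int) (start : Int) (end_ : Int) (k : Int) (out : Int) : Decidable (Spec_helper arr start end_ k out) := by unfold Spec_helper; infer_instance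

-- ===== CLAIM (what is proved, stated in full; the proofs are below) =====
def Claim_equal_helper : Prop := ∀ (arr : List Int) (start : Int) (end_ : Int) (k : Int), Dom_helper arr start end_ k → Pre_helper arr start end_ k → Spec_helper arr start end_ k (helper arr start end_ k)

-- ===== LEMMAS AND PROOFS =====

-- the value Python reads at index i (total via default; ports use the same expression)
def pvVal (arr : List Int) (i : Int) : Int := (PySem.List.pyGet? arr i).getD 0

-- "r is the minimum number of removals": r is a lower bound for every admissible
-- stopping configuration of the window [s, e] and is attained by one of them
def Good (arr : List Int) (k s e r : Int) : Prop :=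
  r ≤ e - s ∧
  (∀ i j : Int, s ≤ i → i < j → j ≤ e → pvVal arr j - pvVal arr i ≤ k → r ≤ (i - s) + (e - j)) ∧
  (r = e - s ∨ ∃ i j : Int, s ≤ i ∧ i < j ∧ j ≤ e ∧ pvVal arr j - pvVal arr i ≤ k ∧ r = (i - s) + (e - j))

theorem good_unique (arr : List Int) (k s e r1 r2 : Int)
    (h1 : Good arr k s e r1) (h2 : Good arr k s e r2) : r1 = r2 := by
  obtain ⟨b1, lb1, at1⟩ := h1
  obtain ⟨b2, lb2, at2⟩ := h2
  have h12 : r1 ≤ r2 := by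
    rcases at2 with h | ⟨i, j, hi, hij, hj, hc, he⟩
    · omega
    · have := lb1 i j hi hij hj hc; omega
  have h21 : r2 ≤ r1 := by
    rcases at1 with h | ⟨i, j, hi, hij, hj, hc, he⟩
    · omega
    · have := lb2 i j hi hij hj hc; omega
  omega

-- generic facts about a fold whose step never increases the accumulator
theorem foldl_dec (g : Int → Int → Int) (hdec : ∀ b x, g b x ≤ b) :
    ∀ (l : List Int) (b : Int), l.foldl g b ≤ b := by
  intro l
  induction l with
  | nil => intro b; simp
  | cons x l ih => intro b; simpa [List.foldl] using le_trans (ih (g b x)) (hdec b x)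

theorem foldl_le_of_mem (g : Int → Int → Int) (hdec : ∀ b x, g b x ≤ b)
    (x c : Int) (hle : ∀ b, g b x ≤ c) :
    ∀ (l : List Int), x ∈ l → ∀ b : Int, l.foldl g b ≤ c := by
  intro l
  induction l with
  | nil => intro h; simp at h
  | cons y l ih =>
    intro hmem b
    rcases List.mem_cons.mp hmem with h | h
    · subst h
      exact le_trans (foldl_dec g hdec l (g b x)) (hle b)
    · exact ih h (g b y)

theorem foldl_attain (g : Int → Int → Int) (Q : Int → Int → Prop)
    (h : ∀ b x, g b x = b ∨ Q x (g b x)) :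
    ∀ (l : List Int) (b : Int), l.foldl g b = b ∨ ∃ x ∈ l, Q x (l.foldl g b) := by
  intro l
  induction l with
  | nil => intro b; simp
  | cons x l ih =>
    intro b
    rcases ih (g b x) with h' | ⟨y, hy, hQ⟩
    · rcases h b x with h0 | hQ
      · left; rw [List.foldl_cons, h', h0]
      · right; exact ⟨x, List.mem_cons_self, by simpa [List.foldl, h'] using hQ⟩
    · right; exact ⟨y, List.mem_cons_of_mem _ hy, by simpa [List.foldl] using hQ⟩

theorem inner_dec (arr : List Int) (k s e i : Int) :
    ∀ b j : Int,
      (if (PySem.List.pyGet? arr j).getD 0 - (PySem.List.pyGet? arr i).getD 0 ≤ k then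
        min b ((i - s) + (e - j)) else b) ≤ b := by
  intro b j; split <;> simp

theorem good_alt (arr : List Int) (k s e : Int) (hse : s < e) :
    Good arr k s e (helper_alt arr s e k) := by
  have hne : ¬ s ≥ e := by omega
  have hval : helper_alt arr s e k =
      (PySem.List.pyRange s (e + 1) 1).foldl (fun best i =>
        (PySem.List.pyRange (i + 1) (e + 1) 1).foldl (fun best j =>
          if (PySem.List.pyGet? arr j).getD 0 - (PySem.List.pyGet? arr i).getD 0 ≤ k then
            min best ((i - s) + (e - j))
          else best) best) (e - s) := by
    simp [helper_alt, hne]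
  set innerG : Int → Int → Int := fun i b =>
      (PySem.List.pyRange (i + 1) (e + 1) 1).foldl (fun best j =>
        if (PySem.List.pyGet? arr j).getD 0 - (PySem.List.pyGet? arr i).getD 0 ≤ k then
          min best ((i - s) + (e - j))
        else best) b with hinnerG
  have houter : helper_alt arr s e k =
      (PySem.List.pyRange s (e + 1) 1).foldl (fun b i => innerG i b) (e - s) := hval
  have hGdec : ∀ (b i : Int), innerG i b ≤ b := by
    intro b i
    exact foldl_dec _ (inner_dec arr k s e i) _ b
  refine ⟨?_, ?_, ?_⟩
  · rw [houter]
    exact foldl_dec (fun b i => innerG i b) (fun b i => hGdec b i) _ _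
  · intro i j hi hij hj hc
    rw [houter]
    have hjmem : j ∈ PySem.List.pyRange (i + 1) (e + 1) 1 := by
      rw [PySem.List.mem_pyRange_one]; omega
    have hinner : ∀ b : Int, innerG i b ≤ (i - s) + (e - j) := by
      intro b
      refine foldl_le_of_mem _ (inner_dec arr k s e i) j ((i - s) + (e - j)) ?_ _ hjmem b
      intro b'
      simp only [pvVal] at hc
      simp [hc]
    have himem : i ∈ PySem.List.pyRange s (e + 1) 1 := by
      rw [PySem.List.mem_pyRange_one]; omega
    exact foldl_le_of_mem (fun b i => innerG i b) (fun b i => hGdec b i) i _ hinner _ himem _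
  · rw [houter]
    have hQ : ∀ (b i : Int), innerG i b = b ∨
        (∃ j ∈ PySem.List.pyRange (i + 1) (e + 1) 1,
          (PySem.List.pyGet? arr j).getD 0 - (PySem.List.pyGet? arr i).getD 0 ≤ k ∧
          innerG i b = (i - s) + (e - j)) := by
      intro b i
      have := foldl_attain
        (fun best j =>
          if (PySem.List.pyGet? arr j).getD 0 - (PySem.List.pyGet? arr i).getD 0 ≤ k then
            min best ((i - s) + (e - j))
          else best)
        (fun j r => (PySem.List.pyGet? arr j).getD 0 - (PySem.List.pyGet? arr i).getD 0 ≤ k ∧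
          r = (i - s) + (e - j))
        (by
          intro b' j
          by_cases hcj : (PySem.List.pyGet? arr j).getD 0 - (PySem.List.pyGet? arr i).getD 0 ≤ k
          · rcases min_choice b' ((i - s) + (e - j)) with hm | hm
            · left; simp [hcj, hm]
            · right; exact ⟨hcj, by simp [hcj, hm]⟩
          · left; simp [hcj])
        (PySem.List.pyRange (i + 1) (e + 1) 1) b
      rcases this with h | ⟨j, hjm, hcj, hr⟩
      · left; exact h
      · right; exact ⟨j, hjm, hcj, hr⟩
    have := foldl_attain (fun b i => innerG i b)
      (fun i r => ∃ j ∈ PySem.List.pyRange (i + 1) (e + 1) 1,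
        (PySem.List.pyGet? arr j).getD 0 - (PySem.List.pyGet? arr i).getD 0 ≤ k ∧
        r = (i - s) + (e - j))
      hQ (PySem.List.pyRange s (e + 1) 1) (e - s)
    rcases this with h | ⟨i, him, j, hjm, hcj, hr⟩
    · left; exact h
    · right
      rw [PySem.List.mem_pyRange_one] at him hjm
      exact ⟨i, j, by omega, by omega, by omega, hcj, hr⟩

theorem good_helper (arr : List Int) (k : Int) (s e : Int) (hse : s < e) :
    Good arr k s e (helper arr s e k) := by
  rw [helper]
  have hne : ¬ s ≥ e := by omega
  rw [if_neg hne]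
  by_cases hc : (PySem.List.pyGet? arr e).getD 0 - (PySem.List.pyGet? arr s).getD 0 ≤ k
  · rw [if_pos hc]
    refine ⟨by omega, ?_, Or.inr ⟨s, e, le_refl s, hse, le_refl e, hc, by omega⟩⟩
    intro i j hi hij hj _; omega
  · rw [if_neg hc]
    by_cases h1 : s < e - 1
    · have g1 := good_helper arr k s (e - 1) h1
      have g2 := good_helper arr k (s + 1) e (by omega)
      obtain ⟨b1, lb1, at1⟩ := g1
      obtain ⟨b2, lb2, at2⟩ := g2
      set r1 := helper arr s (e - 1) k
      set r2 := helper arr (s + 1) e k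
      refine ⟨by simp only [min_def]; split <;> omega, ?_, ?_⟩
      · intro i j hi hij hj hcij
        by_cases hje : j = e
        · have his : i ≠ s := by
            intro h; apply hc; rw [← h, ← hje]; exact hcij
          have h2 := lb2 i j (by omega) hij (by omega) hcij
          have : min (1 + r1) (1 + r2) ≤ 1 + r2 := min_le_right _ _
          omega
        · have h1' := lb1 i j hi hij (by omega) hcij
          have : min (1 + r1) (1 + r2) ≤ 1 + r1 := min_le_left _ _
          omega
      · rcases min_choice (1 + r1) (1 + r2) with hm | hm
        · rw [hm]
          rcases at1 with h | ⟨i, j, hi, hij, hj, hcij, he'⟩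
          · left; omega
          · right; exact ⟨i, j, hi, hij, by omega, hcij, by omega⟩
        · rw [hm]
          rcases at2 with h | ⟨i, j, hi, hij, hj, hcij, he'⟩
          · left; omega
          · right; exact ⟨i, j, by omega, hij, hj, hcij, by omega⟩
    · -- e = s + 1: both recursive calls are on empty windows and return 0
      have he1 : e = s + 1 := by omega
      have hr1 : helper arr s (e - 1) k = 0 := by rw [helper]; simp [show s ≥ e - 1 by omega]
      have hr2 : helper arr (s + 1) e k = 0 := by rw [helper]; simp [show s + 1 ≥ e by omega]
      rw [hr1, hr2]
      refine ⟨by omega, ?_, Or.inl (by omega)⟩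
      intro i j hi hij hj hcij
      have : i = s ∧ j = e := by omega
      exfalso; apply hc; rw [← this.1, ← this.2]; exact hcij
termination_by (e - s).toNat
decreasing_by all_goals omega

-- ===== VERDICT (by name: the statement is the Claim_ definition above) =====
theorem helper_spec : Claim_equal_helper := by
  intro arr start end_ k _ _
  unfold Spec_helper
  by_cases hse : start < end_
  · exact good_unique arr k start end_ _ _ (good_helper arr k start end_ hse) (good_alt arr k start end_ hse)
  · rw [helper, helper_alt]
    simp [show start ≥ end_ by omega]
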